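-- pv_equiv track=rewrite | github.com/higginator/OpenClassrooms | real_OC/helpers.py | separate_into_rows
-- ===== SOURCE A (Python) =====
-- def separate_into_rows(tags_list):
-- 	room_to_associations = {}
-- 	j = 0
-- 	z = 0
-- 	for tag in tags_list:
-- 		if j in room_to_associations:
-- 			room_to_associations[j].append(tag)
-- 		else:
-- 			room_to_associations[j] = [tag]
-- 		z += 1
-- 		if z == 10:
-- 			j += 1
-- 			z = 0
-- 	return room_to_associations
-- ===== SOURCE B (Python) =====
-- def separate_into_rows(tags_list):
--     return {i // 10: tags_list[i:i + 10] for i in range(0, len(tags_list), 10)}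
-- ===== Notes on version B (the rewrite author's own statement) =====
-- stated objective: idiomatic
-- what changed: Replaces the element-by-element loop with running row/position counters by a single dict comprehension that strides over chunk start indices and slices each row out directly.
import Mathlib
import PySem

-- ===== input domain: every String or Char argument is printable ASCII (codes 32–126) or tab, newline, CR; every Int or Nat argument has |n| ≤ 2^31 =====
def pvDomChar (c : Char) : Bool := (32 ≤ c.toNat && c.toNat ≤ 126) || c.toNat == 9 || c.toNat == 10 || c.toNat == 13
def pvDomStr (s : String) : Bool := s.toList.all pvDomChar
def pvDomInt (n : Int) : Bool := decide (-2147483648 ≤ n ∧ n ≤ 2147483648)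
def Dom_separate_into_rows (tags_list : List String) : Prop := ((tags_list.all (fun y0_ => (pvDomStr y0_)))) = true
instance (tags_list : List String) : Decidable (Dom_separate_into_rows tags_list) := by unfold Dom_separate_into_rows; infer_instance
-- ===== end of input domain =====

-- B replaces A's element-by-element loop with counters by a dict comprehension
-- striding over chunk start indices and slicing each row out (objective: idiomatic).

-- ===== PORT A =====
-- one loop iteration of A: state is (dict, j, z)
def sirStep (s : PySem.Dict Int (List String) × Int × Int) (tag : String) :
    PySem.Dict Int (List String) × Int × Int :=
  let d := if s.1.contains s.2.1 then s.1.modify s.2.1 [] (fun l => l ++ [tag])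
           else s.1.insert s.2.1 [tag]
  let z := s.2.2 + 1
  if z == 10 then (d, s.2.1 + 1, 0) else (d, s.2.1, z)

def separate_into_rows (tags_list : List String) : List (Int × List String) :=
  ((tags_list.foldl sirStep (PySem.Dict.empty, 0, 0)).1).items

-- ===== PORT B =====
def separate_into_rows_alt (tags_list : List String) : List (Int × List String) :=
  (PySem.List.pyRange 0 (tags_list.length : Int) 10).map
    (fun i => (PySem.Int.floordiv i 10, PySem.List.slice tags_list (some i) (some (i + 10))))

-- ===== PRECONDITION & SPEC =====
def Spec_separate_into_rows (tags_list : List String) (out : List (Int × List String)) : Prop := out = separate_into_rows_alt tags_list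
instance (tags_list : List String) (out : List (Int × List String)) : Decidable (Spec_separate_into_rows tags_list out) := by unfold Spec_separate_into_rows; infer_instance

-- ===== CLAIM (what is proved, stated in full; the proofs are below) =====
def Claim_equal_separate_into_rows : Prop := ∀ (tags_list : List String), Dom_separate_into_rows tags_list → Spec_separate_into_rows tags_list (separate_into_rows tags_list)

-- ===== LEMMAS AND PROOFS =====

-- chunks of 10 with row numbers starting at j: the common value of both ports
def sirChunks (j : Int) (l : List String) : List (Int × List String) :=
  if h : l = [] then [] else (j, l.take 10) :: sirChunks (j + 1) (l.drop 10)
termination_by l.length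
decreasing_by
  cases l with
  | nil => exact absurd rfl h
  | cons a t => simp [List.length_drop]

theorem sir_dict_eq {l : List (Int × List String)} (d : PySem.Dict Int (List String))
    (h : d.items = l) : d = PySem.Dict.mk l := by
  cases d; simpa using h

theorem sir_contains_mk_notmem (base : List (Int × List String)) (j : Int)
    (h : ∀ p ∈ base, p.1 ≠ j) : (PySem.Dict.mk base).contains j = false := by
  rw [PySem.Dict.contains_mk]
  simp only [List.any_eq_false]
  intro p hp
  simpa using h p hp

theorem sir_contains_mk_last (base : List (Int × List String)) (j : Int) (row : List String) :
    (PySem.Dict.mk (base ++ [(j, row)])).contains j = true := by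
  rw [PySem.Dict.contains_mk]
  simp

theorem sir_get?_mk_last (base : List (Int × List String)) (j : Int) (row : List String)
    (h : ∀ p ∈ base, p.1 ≠ j) :
    (PySem.Dict.mk (base ++ [(j, row)])).get? j = some row := by
  induction base with
  | nil => simp [PySem.Dict.get?_mk_cons]
  | cons p t ih =>
      obtain ⟨k, v⟩ := p
      have hk : k ≠ j := by simpa using h (k, v) (by simp)
      rw [List.cons_append, PySem.Dict.get?_mk_cons]
      simp only [hk, beq_iff_eq, if_false]
      exact ih (fun q hq => h q (by simp [hq]))

theorem sir_map_overwrite (base : List (Int × List String)) (j : Int) (v : List String)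
    (h : ∀ p ∈ base, p.1 ≠ j) :
    base.map (fun p => if p.1 == j then (j, v) else p) = base := by
  have : ∀ p ∈ base, (if p.1 == j then (j, v) else p) = p := by
    intro p hp
    simp [h p hp]
  rw [List.map_congr_left this]
  simp

-- one full (or final partial) row is accumulated by folding its remaining elements
theorem sir_rowFold (base : List (Int × List String)) (j : Int)
    (hb : ∀ p ∈ base, p.1 ≠ j) :
    ∀ (r row : List String), row ≠ [] → row.length < 10 → row.length + r.length ≤ 10 →
    r.foldl sirStep (PySem.Dict.mk (base ++ [(j, row)]), j, (row.length : Int)) =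
      (if row.length + r.length = 10
       then (PySem.Dict.mk (base ++ [(j, row ++ r)]), j + 1, 0)
       else (PySem.Dict.mk (base ++ [(j, row ++ r)]), j, ((row.length + r.length : Nat) : Int))) := by
  intro r
  induction r with
  | nil =>
      intro row _ hlt _
      simp [List.foldl_nil]
      omega
  | cons t ts ih =>
      intro row hne hlt hsum
      rw [List.foldl_cons]
      have hc := sir_contains_mk_last base j row
      have hget : (PySem.Dict.mk (base ++ [(j, row)])).getD j [] = row := by
        rw [PySem.Dict.getD_eq_get?_getD, sir_get?_mk_last base j row hb]
        rfl
      have hins : (PySem.Dict.mk (base ++ [(j, row)])).insert j (row ++ [t]) =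
          PySem.Dict.mk (base ++ [(j, row ++ [t])]) := by
        apply sir_dict_eq
        rw [PySem.Dict.items_insert_of_contains _ _ hc]
        simp only [List.map_append, sir_map_overwrite base j _ hb]
        simp
      have hstep : sirStep (PySem.Dict.mk (base ++ [(j, row)]), j, (row.length : Int)) t =
          (if ((row.length : Int) + 1) == 10
           then (PySem.Dict.mk (base ++ [(j, row ++ [t])]), j + 1, 0)
           else (PySem.Dict.mk (base ++ [(j, row ++ [t])]), j, (row.length : Int) + 1)) := by
        simp only [sirStep, hc, if_true, PySem.Dict.modify, hget, hins]
      rw [hstep]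
      by_cases h10 : row.length + 1 = 10
      · have hts : ts = [] := by
          have := hsum
          simp only [List.length_cons] at this
          cases ts with
          | nil => rfl
          | cons a b => simp at this; omega
        subst hts
        have : ((row.length : Int) + 1) == 10 := beq_iff_eq.mpr (by omega)
        rw [if_pos this]
        simp only [List.foldl_nil]
        rw [if_pos (by simp only [List.length_singleton]; omega)]
      · have : (((row.length : Int) + 1) == 10) = false := beq_eq_false_iff_ne.mpr (by omega)
        rw [if_neg (by simp [this])]
        have hcast : (row.length : Int) + 1 = ((row ++ [t]).length : Nat) := by
          simp
        rw [hcast]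
        have := ih (row ++ [t]) (by simp) (by simp; omega) (by simp at hsum ⊢; omega)
        rw [this]
        have hc2 : (row ++ [t]).length + ts.length = row.length + (t :: ts).length := by
          simp only [List.length_append, List.length_cons, List.length_nil]; omega
        have hl2 : row ++ [t] ++ ts = row ++ t :: ts := by simp
        rw [hc2, hl2]

-- A's whole fold, generalized over the accumulated dict and row counter
theorem sir_mainFold : ∀ (n : Nat) (l : List String) (base : List (Int × List String)) (j : Int),
    l.length ≤ n → (∀ p ∈ base, p.1 < j) →
    ((l.foldl sirStep (PySem.Dict.mk base, j, 0)).1).items = base ++ sirChunks j l := by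
  intro n
  induction n with
  | zero =>
      intro l base j hlen _
      have : l = [] := List.eq_nil_of_length_eq_zero (by omega)
      subst this
      simp [sirChunks]
  | succ n ih =>
      intro l base j hlen hb
      cases l with
      | nil => simp [sirChunks]
      | cons t ts =>
          have hbne : ∀ p ∈ base, p.1 ≠ j := fun p hp => ne_of_lt (hb p hp)
          rw [List.foldl_cons]
          have hc0 : (PySem.Dict.mk base).contains j = false :=
            sir_contains_mk_notmem base j hbne
          have hins : (PySem.Dict.mk base).insert j [t] =
              PySem.Dict.mk (base ++ [(j, [t])]) := by
            apply sir_dict_eq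
            rw [PySem.Dict.items_insert_of_not_contains _ _ hc0]
          have hstep : sirStep (PySem.Dict.mk base, j, 0) t =
              (PySem.Dict.mk (base ++ [(j, [t])]), j, 1) := by
            simp [sirStep, hc0, hins]
          rw [hstep]
          have hsplit : ts = ts.take 9 ++ ts.drop 9 := (List.take_append_drop 9 ts).symm
          conv_lhs => rw [hsplit]
          rw [List.foldl_append]
          have h1 : ((1 : Nat) : Int) = 1 := by simp
          have hrf := sir_rowFold base j hbne (ts.take 9) [t] (by simp) (by simp) (by simp; omega)
          simp only [List.length_singleton] at hrf
          rw [← h1, hrf]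
          by_cases hlong : 9 ≤ ts.length
          · have htk : (ts.take 9).length = 9 := by simp [hlong]
            rw [htk, if_pos (by omega)]
            have hkeys : ∀ p ∈ base ++ [(j, [t] ++ ts.take 9)], p.1 < j + 1 := by
              intro p hp
              rcases List.mem_append.mp hp with h | h
              · exact lt_trans (hb p h) (by omega)
              · obtain rfl := List.mem_singleton.mp h
                show j < j + 1
                omega
            have hlen' : (ts.drop 9).length ≤ n := by
              simp only [List.length_cons] at hlen
              rw [List.length_drop]; omega
            rw [ih (ts.drop 9) (base ++ [(j, [t] ++ ts.take 9)]) (j + 1) hlen' hkeys]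
            conv_rhs => rw [sirChunks]
            rw [dif_neg (by simp : ¬ (t :: ts = []))]
            simp [List.append_assoc, List.take_succ_cons, List.drop_succ_cons]
          · have htk : ts.take 9 = ts := List.take_of_length_le (by omega)
            rw [htk, if_neg (by omega)]
            have hdr : ts.drop 9 = [] := List.drop_of_length_le (by omega)
            rw [hdr, List.foldl_nil]
            rw [sirChunks, dif_neg (by simp : ¬ (t :: ts = []))]
            have htk10 : (t :: ts).take 10 = t :: ts := List.take_of_length_le (by simp; omega)
            have hdr10 : (t :: ts).drop 10 = [] := List.drop_of_length_le (by simp; omega)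
            rw [htk10, hdr10, sirChunks]
            simp

-- chunks as an indexed map: the shape of B's comprehension
theorem sir_chunks_eq_map : ∀ (n : Nat) (l : List String) (j : Int), l.length ≤ n →
    sirChunks j l = (List.range ((l.length + 9) / 10)).map
      (fun (k : Nat) => (j + (k : Int), (l.drop (10 * k)).take 10)) := by
  intro n
  induction n with
  | zero =>
      intro l j hlen
      have : l = [] := List.eq_nil_of_length_eq_zero (by omega)
      subst this
      simp [sirChunks]
  | succ n ih =>
      intro l j hlen
      by_cases hnil : l = []
      · subst hnil; simp [sirChunks]
      · rw [sirChunks, dif_neg hnil]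
        have hpos : 1 ≤ l.length := by
          cases l with
          | nil => exact absurd rfl hnil
          | cons a b => simp
        obtain ⟨m, hm⟩ : ∃ m, (l.length + 9) / 10 = m + 1 :=
          ⟨(l.length + 9) / 10 - 1, by omega⟩
        rw [hm, List.range_succ_eq_map]
        rw [List.map_cons, List.map_map]
        congr 1
        · simp
        · have hlen' : (l.drop 10).length ≤ n := by simp [List.length_drop]; omega
          rw [ih (l.drop 10) (j + 1) hlen']
          have hm' : ((l.drop 10).length + 9) / 10 = m := by
            rw [List.length_drop]; omega
          rw [hm']
          apply List.map_congr_left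
          intro k _
          simp only [Function.comp_apply, List.drop_drop, Prod.mk.injEq]
          constructor
          · push_cast; ring
          · have hidx : 10 + 10 * k = 10 * k.succ := by omega
            rw [hidx]

-- B's port in the same indexed-map shape
theorem sir_alt_eq_map (l : List String) :
    separate_into_rows_alt l = (List.range ((l.length + 9) / 10)).map
      (fun (k : Nat) => ((0 : Int) + (k : Int), (l.drop (10 * k)).take 10)) := by
  unfold separate_into_rows_alt
  rw [PySem.List.pyRange_of_pos 0 (l.length : Int) (by omega : (0:Int) < 10)]
  by_cases hnil : l.length = 0
  · simp [hnil]
  · rw [if_pos (by exact_mod_cast Nat.pos_of_ne_zero hnil)]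
    have hcnt : (((l.length : Int) - 0 + 10 - 1) / 10).toNat = (l.length + 9) / 10 := by
      omega
    rw [hcnt, List.map_map]
    apply List.map_congr_left
    intro k _
    simp only [Function.comp_apply, Prod.mk.injEq]
    have h1 : (0 : Int) + 10 * (k : Int) = ((10 * k : Nat) : Int) := by push_cast; ring
    rw [h1]
    constructor
    · rw [PySem.Int.floordiv_eq_ediv_of_pos (by omega : (0:Int) < 10)]
      push_cast
      omega
    · rw [show ((10:Int)) = (((10:Nat)) : Int) from by norm_num,
          PySem.List.slice_natCast_add l (10 * k) 10]

theorem sir_empty_mk : (PySem.Dict.empty : PySem.Dict Int (List String)) = PySem.Dict.mk [] := rfl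

-- ===== VERDICT (by name: the statement is the Claim_ definition above) =====
theorem separate_into_rows_spec : Claim_equal_separate_into_rows := by
  intro l _
  unfold Spec_separate_into_rows separate_into_rows
  rw [sir_empty_mk,
      sir_mainFold l.length l [] 0 le_rfl (by simp),
      List.nil_append,
      sir_chunks_eq_map l.length l 0 le_rfl,
      sir_alt_eq_map l]
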